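-- pv_equiv track=rewrite | github.com/milanXpetrovic/prsp-vjezbe | vjezbe/vjezba_3/zd_8.py | earliest_time_to_reach_target
-- ===== SOURCE A (Python) =====
-- def earliest_time_to_reach_target(t, sx, sy, ex, ey, wind_directions):
--     dx = ex - sx
--     dy = ey - sy
--
--     for i in range(t):
--         direction = wind_directions[i]
--
--         if direction == 'E' and dx > 0:
--             dx -= 1
--         elif direction == 'W' and dx < 0:
--             dx += 1
--         elif direction == 'N' and dy > 0:
--             dy -= 1
--         elif direction == 'S' and dy < 0:
--             dy += 1
--
--         if dx == 0 and dy == 0: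
--             return i + 1
--     return -1
-- ===== SOURCE B (Python) =====
-- def _first_time(need, d, winds):
--     """1-based time at which `need` occurrences of direction `d` have blown; 0 if none needed, None if never."""
--     if need == 0:
--         return 0
--     for i, w in enumerate(winds):
--         if w == d:
--             need -= 1
--             if need == 0:
--                 return i + 1
--     return None
--
--
-- def earliest_time_to_reach_target(t, sx, sy, ex, ey, wind_directions):
--     winds = wind_directions[:max(t, 0)]
--     tx = _first_time(abs(ex - sx), 'E' if ex > sx else 'W', winds)
--     ty = _first_time(abs(ey - sy), 'N' if ey > sy else 'S', winds)
--     if tx is None or ty is None: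
--         return -1
--     return max(tx, ty)
-- ===== Notes on version B (the rewrite author's own statement) =====
-- stated objective: alternative
-- what changed: Replaces A's single step-by-step simulation of the (dx,dy) state with two independent per-axis satisfaction-time scans (time at which the needed count of the one relevant direction is reached) combined by max; Pre_ excludes t > len(wind_directions), where A hits an IndexError unless the target happens to be reached before the list runs out.
-- intended difference: When the start already equals the target (sx==ex and sy==ey), A returns 1 for t>=1 and -1 for t==0 although no time is needed, while B returns 0, the intended earliest time. — e.g. on earliest_time_to_reach_target(1, 0, 0, 0, 0, ["E"]): A returns 1, B returns 0
-- outside the precondition, e.g. on earliest_time_to_reach_target(2, 0, 0, 1, 0, ['E']): A returns 1, B returns 1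
import Mathlib
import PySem

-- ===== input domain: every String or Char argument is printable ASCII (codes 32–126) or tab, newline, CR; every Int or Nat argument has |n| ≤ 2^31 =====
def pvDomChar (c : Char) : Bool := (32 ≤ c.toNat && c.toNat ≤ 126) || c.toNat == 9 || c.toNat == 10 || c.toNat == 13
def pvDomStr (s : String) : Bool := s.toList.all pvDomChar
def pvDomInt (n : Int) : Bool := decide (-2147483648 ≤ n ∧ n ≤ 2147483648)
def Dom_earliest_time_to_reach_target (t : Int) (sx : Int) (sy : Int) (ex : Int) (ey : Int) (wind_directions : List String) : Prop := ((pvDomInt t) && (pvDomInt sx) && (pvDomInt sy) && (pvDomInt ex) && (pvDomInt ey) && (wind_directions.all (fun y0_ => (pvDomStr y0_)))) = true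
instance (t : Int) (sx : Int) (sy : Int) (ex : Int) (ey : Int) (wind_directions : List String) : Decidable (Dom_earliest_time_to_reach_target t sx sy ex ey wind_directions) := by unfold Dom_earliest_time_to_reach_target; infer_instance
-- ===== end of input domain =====

-- B replaces A's combined step-by-step (dx,dy) simulation by two independent per-axis
-- satisfaction-time scans combined by max (objective: alternative decomposition, same cost).

-- ===== PORT A =====
-- the loop body of A: fuel = remaining iterations of `for i in range(t)`, i = current index
def pvGoA (wind : List String) : Nat → Nat → Int → Int → Int
  | 0, _, _, _ => -1
  | fuel + 1, i, dx, dy =>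
    match PySem.List.pyGet? wind (i : Int) with
    | none => -1  -- IndexError (excluded by Pre_)
    | some direction =>
      let p : Int × Int :=
        if direction = "E" ∧ dx > 0 then (dx - 1, dy)
        else if direction = "W" ∧ dx < 0 then (dx + 1, dy)
        else if direction = "N" ∧ dy > 0 then (dx, dy - 1)
        else if direction = "S" ∧ dy < 0 then (dx, dy + 1)
        else (dx, dy)
      if p.1 = 0 ∧ p.2 = 0 then (i : Int) + 1 else pvGoA wind fuel (i + 1) p.1 p.2

def earliest_time_to_reach_target (t : Int) (sx : Int) (sy : Int) (ex : Int) (ey : Int) (wind_directions : List String) : Int :=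
  pvGoA wind_directions t.toNat 0 (ex - sx) (ey - sy)

-- ===== PORT B =====
-- the `for i, w in enumerate(winds)` loop of _first_time
def pvFirstTimeGo (d : String) : List String → Int → Int → Option Int
  | [], _, _ => none
  | w :: ws, need, i =>
    if w = d then
      (if need - 1 = 0 then some (i + 1) else pvFirstTimeGo d ws (need - 1) (i + 1))
    else pvFirstTimeGo d ws need (i + 1)

def pvFirstTime (need : Int) (d : String) (winds : List String) : Option Int :=
  if need = 0 then some 0 else pvFirstTimeGo d winds need 0

def earliest_time_to_reach_target_alt (t : Int) (sx : Int) (sy : Int) (ex : Int) (ey : Int) (wind_directions : List String) : Int :=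
  let winds := PySem.List.slice wind_directions none (some (max t 0))
  let tx := pvFirstTime |ex - sx| (if ex > sx then "E" else "W") winds
  let ty := pvFirstTime |ey - sy| (if ey > sy then "N" else "S") winds
  match tx, ty with
  | some a, some b => max a b
  | _, _ => -1

-- ===== PRECONDITION & SPEC =====
-- Pre_ excludes t > len(wind_directions): there A raises IndexError unless the target
-- happens to be reached before the list runs out (no closed form separates the two).
def Pre_earliest_time_to_reach_target (t : Int) (sx : Int) (sy : Int) (ex : Int) (ey : Int) (wind_directions : List String) : Prop :=
  t ≤ (wind_directions.length : Int)
instance (t : Int) (sx : Int) (sy : Int) (ex : Int) (ey : Int) (wind_directions : List String) : Decidable (Pre_earliest_time_to_reach_target t sx sy ex ey wind_directions) := by unfold Pre_earliest_time_to_reach_target; infer_instance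

def pvWitness_earliest_time_to_reach_target : Int × Int × Int × Int × Int × List String := (1, 0, 0, 1, 0, ["E"])

-- When the start already equals the target (sx = ex and sy = ey), A returns 1 for t ≥ 1 and -1 for
-- t ≤ 0 although no time is needed, while B returns 0, the intended earliest time.
def D_earliest_time_to_reach_target (t : Int) (sx : Int) (sy : Int) (ex : Int) (ey : Int) (wind_directions : List String) : Prop :=
  sx = ex ∧ sy = ey
instance (t : Int) (sx : Int) (sy : Int) (ex : Int) (ey : Int) (wind_directions : List String) : Decidable (D_earliest_time_to_reach_target t sx sy ex ey wind_directions) := by unfold D_earliest_time_to_reach_target; infer_instance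

def Spec_earliest_time_to_reach_target (t : Int) (sx : Int) (sy : Int) (ex : Int) (ey : Int) (wind_directions : List String) (out : Int) : Prop := ¬ D_earliest_time_to_reach_target t sx sy ex ey wind_directions → out = earliest_time_to_reach_target_alt t sx sy ex ey wind_directions
instance (t : Int) (sx : Int) (sy : Int) (ex : Int) (ey : Int) (wind_directions : List String) (out : Int) : Decidable (Spec_earliest_time_to_reach_target t sx sy ex ey wind_directions out) := by unfold Spec_earliest_time_to_reach_target; infer_instance

def pvDiffWitness_earliest_time_to_reach_target : Int × Int × Int × Int × Int × List String := (1, 0, 0, 0, 0, ["E"])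
def pvDiffWitnessOut_earliest_time_to_reach_target : Int × Int := (1, 0)

-- ===== CLAIM (what is proved, stated in full; the proofs are below) =====
def Claim_unchanged_earliest_time_to_reach_target : Prop := ∀ (t : Int) (sx : Int) (sy : Int) (ex : Int) (ey : Int) (wind_directions : List String), Dom_earliest_time_to_reach_target t sx sy ex ey wind_directions → Pre_earliest_time_to_reach_target t sx sy ex ey wind_directions → Spec_earliest_time_to_reach_target t sx sy ex ey wind_directions (earliest_time_to_reach_target t sx sy ex ey wind_directions)
def Claim_changed_earliest_time_to_reach_target : Prop := Dom_earliest_time_to_reach_target (pvDiffWitness_earliest_time_to_reach_target.1) (pvDiffWitness_earliest_time_to_reach_target.2.1) (pvDiffWitness_earliest_time_to_reach_target.2.2.1) (pvDiffWitness_earliest_time_to_reach_target.2.2.2.1) (pvDiffWitness_earliest_time_to_reach_target.2.2.2.2.1) (pvDiffWitness_earliest_time_to_reach_target.2.2.2.2.2) ∧ Pre_earliest_time_to_reach_target (pvDiffWitness_earliest_time_to_reach_target.1) (pvDiffWitness_earliest_time_to_reach_target.2.1) (pvDiffWitness_earliest_time_to_reach_target.2.2.1) (pvDiffWitness_earliest_time_to_reach_target.2.2.2.1)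 (pvDiffWitness_earliest_time_to_reach_target.2.2.2.2.1) (pvDiffWitness_earliest_time_to_reach_target.2.2.2.2.2) ∧ D_earliest_time_to_reach_target (pvDiffWitness_earliest_time_to_reach_target.1) (pvDiffWitness_earliest_time_to_reach_target.2.1) (pvDiffWitness_earliest_time_to_reach_target.2.2.1) (pvDiffWitness_earliest_time_to_reach_target.2.2.2.1) (pvDiffWitness_earliest_time_to_reach_target.2.2.2.2.1) (pvDiffWitness_earliest_time_to_reach_target.2.2.2.2.2) ∧ earliest_time_to_reach_target (pvDiffWitness_earliest_time_to_reach_target.1) (pvDiffWitness_earliest_time_to_reach_target.2.1) (pvDiffWitness_earliest_time_to_reach_target.2.2.1) (pvDiffWitness_earliest_time_to_reach_target.2.2.2.1) (pvDiffWitness_earliest_time_to_reach_target.2.2.2.2.1) (pvDiffWitness_earliest_time_to_reach_target.2.2.2.2.2) = pvDiffWitnessOut_earliest_time_to_reach_target.1 ∧ earliest_time_to_reach_target_alt (pvDiffWitness_earliest_time_to_reach_target.1) (pvDiffWitness_earliest_time_to_reach_target.2.1) (pvDiffWitness_earliest_time_to_reach_target.2.2.1) (pvDiffWitness_earliest_time_to_reach_target.2.2.2.1)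 (pvDiffWitness_earliest_time_to_reach_target.2.2.2.2.1) (pvDiffWitness_earliest_time_to_reach_target.2.2.2.2.2) = pvDiffWitnessOut_earliest_time_to_reach_target.2 ∧ pvDiffWitnessOut_earliest_time_to_reach_target.1 ≠ pvDiffWitnessOut_earliest_time_to_reach_target.2
def Claim_exact_earliest_time_to_reach_target : Prop := ∀ (t : Int) (sx : Int) (sy : Int) (ex : Int) (ey : Int) (wind_directions : List String), Dom_earliest_time_to_reach_target t sx sy ex ey wind_directions → Pre_earliest_time_to_reach_target t sx sy ex ey wind_directions → D_earliest_time_to_reach_target t sx sy ex ey wind_directions → earliest_time_to_reach_target t sx sy ex ey wind_directions ≠ earliest_time_to_reach_target_alt t sx sy ex ey wind_directions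

-- ===== LEMMAS AND PROOFS =====

-- proof-side relative simulation of A's loop over the remaining prefix
def pvSimA : List String → Int → Int → Int → Int
  | [], _, _, _ => -1
  | w :: ws, i, dx, dy =>
    let p : Int × Int :=
      if w = "E" ∧ dx > 0 then (dx - 1, dy)
      else if w = "W" ∧ dx < 0 then (dx + 1, dy)
      else if w = "N" ∧ dy > 0 then (dx, dy - 1)
      else if w = "S" ∧ dy < 0 then (dx, dy + 1)
      else (dx, dy)
    if p.1 = 0 ∧ p.2 = 0 then i + 1 else pvSimA ws (i + 1) p.1 p.2

-- proof-side relative occurrence search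
def pvT (d : String) : List String → Int → Option Int
  | [], _ => none
  | w :: ws, need =>
    if w = d ∧ need = 1 then some 1
    else (pvT d ws (if w = d then need - 1 else need)).map (· + 1)

-- per-axis satisfaction time
def pvAx (pos neg : String) (l : List String) (delta : Int) : Option Int :=
  if delta = 0 then some 0 else pvT (if delta > 0 then pos else neg) l |delta|

def pvStep (pos neg : String) (w : String) (delta : Int) : Int :=
  if w = pos ∧ delta > 0 then delta - 1
  else if w = neg ∧ delta < 0 then delta + 1
  else delta

def pvComb (l : List String) (i dx dy : Int) : Int :=
  match pvAx "E" "W" l dx, pvAx "N" "S" l dy with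
  | some a, some b => i + max a b
  | _, _ => -1

theorem pvGoA_eq_simA (wind : List String) : ∀ (fuel i : Nat) (dx dy : Int),
    i + fuel ≤ wind.length →
    pvGoA wind fuel i dx dy = pvSimA ((wind.drop i).take fuel) i dx dy := by
  intro fuel
  induction fuel with
  | zero => intro i dx dy _; simp [pvGoA, pvSimA]
  | succ n ih =>
    intro i dx dy h
    have hi : i < wind.length := by omega
    have hget : PySem.List.pyGet? wind (i : Int) = some wind[i] :=
      PySem.List.pyGet?_ofNat wind i hi
    have hdrop : wind.drop i = wind[i] :: wind.drop (i + 1) :=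
      List.drop_eq_getElem_cons hi
    rw [hdrop]
    simp only [pvGoA, hget, List.take_succ_cons, pvSimA]
    split_ifs <;>
      first
        | rfl
        | (rw [ih (i + 1) _ _ (by omega)]; norm_cast)

theorem pvT_pos {d : String} : ∀ {l : List String} {need a : Int},
    pvT d l need = some a → 1 ≤ a := by
  intro l
  induction l with
  | nil => intro need a h; simp [pvT] at h
  | cons w ws ih =>
    intro need a h
    simp only [pvT] at h
    split at h
    · simp only [Option.some.injEq] at h; omega
    · cases hE : pvT d ws (if w = d then need - 1 else need) with
      | none => rw [hE] at h; simp at h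
      | some b =>
        rw [hE] at h
        simp only [Option.map_some, Option.some.injEq] at h
        have := ih hE; omega

theorem pvAx_nonneg {pos neg : String} {l : List String} {delta a : Int}
    (h : pvAx pos neg l delta = some a) : 0 ≤ a := by
  unfold pvAx at h
  split at h
  · simp only [Option.some.injEq] at h; omega
  · have := pvT_pos h; omega

theorem pvFirstTimeGo_shift (d : String) : ∀ (l : List String) (need i : Int),
    pvFirstTimeGo d l need i = (pvT d l need).map (i + ·) := by
  intro l
  induction l with
  | nil => intro need i; simp [pvFirstTimeGo, pvT]
  | cons w ws ih =>
    intro need i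
    simp only [pvFirstTimeGo, pvT]
    by_cases hw : w = d
    · rw [if_pos hw]
      by_cases hn : need = 1
      · rw [if_pos (show need - 1 = 0 by omega), if_pos (show w = d ∧ need = 1 from ⟨hw, hn⟩)]
        simp
      · rw [if_neg (show ¬ (need - 1 = 0) by omega),
            if_neg (show ¬ (w = d ∧ need = 1) from fun hc => hn hc.2), if_pos hw, ih]
        cases pvT d ws (need - 1) <;> simp
        omega
    · rw [if_neg hw, if_neg (fun hc => hw hc.1), if_neg hw, ih]
      cases pvT d ws need <;> simp
      omega

theorem pvFirstTime_eq_pvAx (pos neg : String) (l : List String) (delta : Int) :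
    pvFirstTime |delta| (if delta > 0 then pos else neg) l = pvAx pos neg l delta := by
  unfold pvFirstTime pvAx
  by_cases h : delta = 0
  · simp [h]
  · have h' : ¬ (|delta| = 0) := by
      simp only [abs_eq_zero]; exact h
    rw [if_neg h', if_neg h, pvFirstTimeGo_shift]
    cases pvT (if delta > 0 then pos else neg) l |delta| <;> simp

theorem pvAx_step (pos neg w : String) (ws : List String) (delta : Int) (h : delta ≠ 0) :
    pvAx pos neg (w :: ws) delta = (pvAx pos neg ws (pvStep pos neg w delta)).map (· + 1) := by
  rcases lt_or_gt_of_ne h with hneg | hpos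
  · -- delta < 0 : relevant direction is neg
    have hm : |delta| = -delta := abs_of_neg hneg
    have hd : ¬ (delta > 0) := by omega
    unfold pvAx pvStep
    rw [if_neg h, if_neg hd]
    by_cases hw : w = neg
    · rw [if_neg (show ¬ (w = pos ∧ delta > 0) from fun hc => hd hc.2),
          if_pos (show w = neg ∧ delta < 0 from ⟨hw, hneg⟩)]
      by_cases h1 : delta = -1
      · subst h1
        have h0 : (-1 : Int) + 1 = 0 := by norm_num
        rw [h0, if_pos rfl]
        simp [pvT, hw]
      · have hne : delta + 1 ≠ 0 := by omega
        have hm' : |delta + 1| = |delta| - 1 := by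
          rw [abs_of_neg (show delta + 1 < 0 by omega), hm]; ring
        rw [if_neg hne, if_neg (show ¬ (delta + 1 > 0) by omega)]
        simp only [pvT]
        rw [if_neg (show ¬ (w = neg ∧ |delta| = 1) from fun hc => by
              have := hc.2; omega),
            if_pos hw, hm']
    · rw [if_neg (show ¬ (w = pos ∧ delta > 0) from fun hc => hd hc.2),
          if_neg (show ¬ (w = neg ∧ delta < 0) from fun hc => hw hc.1),
          if_neg h, if_neg hd]
      simp only [pvT]
      rw [if_neg (show ¬ (w = neg ∧ |delta| = 1) from fun hc => hw hc.1), if_neg hw]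
  · -- delta > 0 : relevant direction is pos
    have hm : |delta| = delta := abs_of_pos hpos
    unfold pvAx pvStep
    rw [if_neg h, if_pos hpos]
    by_cases hw : w = pos
    · rw [if_pos (show w = pos ∧ delta > 0 from ⟨hw, hpos⟩)]
      by_cases h1 : delta = 1
      · subst h1
        have h0 : (1 : Int) - 1 = 0 := by norm_num
        rw [h0, if_pos rfl]
        simp [pvT, hw]
      · have hne : delta - 1 ≠ 0 := by omega
        have hm' : |delta - 1| = |delta| - 1 := by
          rw [abs_of_pos (show (0 : Int) < delta - 1 by omega), hm]
        rw [if_neg hne, if_pos (show delta - 1 > 0 by omega)]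
        simp only [pvT]
        rw [if_neg (show ¬ (w = pos ∧ |delta| = 1) from fun hc => by
              have := hc.2; omega),
            if_pos hw, hm']
    · rw [if_neg (show ¬ (w = pos ∧ delta > 0) from fun hc => hw hc.1),
          if_neg (show ¬ (w = neg ∧ delta < 0) from fun hc => absurd hc.2 (by omega)),
          if_neg h, if_pos hpos]
      simp only [pvT]
      rw [if_neg (show ¬ (w = pos ∧ |delta| = 1) from fun hc => hw hc.1), if_neg hw]

theorem pvStep_zero (pos neg w : String) : pvStep pos neg w 0 = 0 := by
  simp [pvStep]

theorem pvAx_zero (pos neg : String) (l : List String) : pvAx pos neg l 0 = some 0 := by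
  simp [pvAx]

-- the update pair of A/pvSimA equals the two independent axis steps
theorem pvUpd_eq (w : String) (dx dy : Int) :
    (if w = "E" ∧ dx > 0 then (dx - 1, dy)
     else if w = "W" ∧ dx < 0 then (dx + 1, dy)
     else if w = "N" ∧ dy > 0 then (dx, dy - 1)
     else if w = "S" ∧ dy < 0 then (dx, dy + 1)
     else (dx, dy)) = (pvStep "E" "W" w dx, pvStep "N" "S" w dy) := by
  unfold pvStep
  by_cases hE : w = "E"
  · subst hE; split_ifs with h1 h2 h3 h4 <;> simp_all
  · by_cases hW : w = "W"
    · subst hW; split_ifs with h1 h2 h3 h4 <;> simp_all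
    · by_cases hN : w = "N"
      · subst hN; split_ifs with h1 h2 h3 h4 <;> simp_all
      · by_cases hS : w = "S"
        · subst hS; split_ifs with h1 h2 h3 h4 <;> simp_all
        · split_ifs with h1 h2 h3 h4 <;> simp_all

theorem pvStepX_moved {w : String} {dx : Int} (h : pvStep "E" "W" w dx ≠ dx) :
    w = "E" ∨ w = "W" := by
  unfold pvStep at h
  split_ifs at h with h1 h2
  · exact Or.inl h1.1
  · exact Or.inr h2.1
  · exact absurd rfl h

theorem pvStepY_moved {w : String} {dy : Int} (h : pvStep "N" "S" w dy ≠ dy) :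
    w = "N" ∨ w = "S" := by
  unfold pvStep at h
  split_ifs at h with h1 h2
  · exact Or.inl h1.1
  · exact Or.inr h2.1
  · exact absurd rfl h

theorem pvSimA_eq_comb : ∀ (l : List String) (i dx dy : Int),
    ¬ (dx = 0 ∧ dy = 0) → pvSimA l i dx dy = pvComb l i dx dy := by
  intro l
  induction l with
  | nil =>
    intro i dx dy h
    unfold pvComb
    by_cases hx : dx = 0
    · have hy : dy ≠ 0 := fun hy => h ⟨hx, hy⟩
      rw [hx, pvAx_zero]
      unfold pvAx
      rw [if_neg hy]
      simp [pvSimA, pvT]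
    · unfold pvAx
      rw [if_neg hx]
      simp only [pvT, pvSimA]
  | cons w ws ih =>
    intro i dx dy h
    simp only [pvSimA, pvUpd_eq]
    by_cases hdone : (pvStep "E" "W" w dx, pvStep "N" "S" w dy).1 = 0 ∧
        (pvStep "E" "W" w dx, pvStep "N" "S" w dy).2 = 0
    · rw [if_pos hdone]
      obtain ⟨hx0, hy0⟩ := hdone
      simp only at hx0 hy0
      by_cases hx : dx = 0
      · -- y axis finishes now
        have hy : dy ≠ 0 := fun hy => h ⟨hx, hy⟩
        unfold pvComb
        rw [hx, pvAx_zero, pvAx_step _ _ _ _ _ hy, hy0, pvAx_zero]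
        simp
      · by_cases hy : dy = 0
        · unfold pvComb
          rw [hy, pvAx_zero, pvAx_step _ _ _ _ _ hx, hx0, pvAx_zero]
          simp
        · -- both nonzero: one wind move cannot finish both axes
          exfalso
          have hxm : pvStep "E" "W" w dx ≠ dx := by rw [hx0]; exact fun h' => hx h'.symm
          have hym : pvStep "N" "S" w dy ≠ dy := by rw [hy0]; exact fun h' => hy h'.symm
          rcases pvStepX_moved hxm with h1 | h1 <;>
            rcases pvStepY_moved hym with h2 | h2 <;> simp_all
    · rw [if_neg hdone]
      simp only at hdone
      rw [ih (i + 1) _ _ hdone]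
      unfold pvComb
      by_cases hx : dx = 0
      · have hy : dy ≠ 0 := fun hy => h ⟨hx, hy⟩
        rw [hx, pvAx_zero, pvAx_step _ _ _ _ _ hy, pvStep_zero, pvAx_zero]
        cases hb : pvAx "N" "S" ws (pvStep "N" "S" w dy) with
        | none => simp
        | some b =>
          have := pvAx_nonneg hb
          simp only [Option.map_some]
          omega
      · by_cases hy : dy = 0
        · rw [hy, pvAx_zero, pvAx_step _ _ _ _ _ hx, pvStep_zero, pvAx_zero]
          cases ha : pvAx "E" "W" ws (pvStep "E" "W" w dx) with
          | none => simp
          | some a =>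
            have := pvAx_nonneg ha
            simp only [Option.map_some]
            omega
        · rw [pvAx_step _ _ _ _ _ hx, pvAx_step _ _ _ _ _ hy]
          cases ha : pvAx "E" "W" ws (pvStep "E" "W" w dx) <;>
            cases hb : pvAx "N" "S" ws (pvStep "N" "S" w dy) <;>
              simp only [Option.map_some, Option.map_none]
          omega

theorem pvGoA_self (wind : List String) : ∀ (fuel i : Nat),
    pvGoA wind fuel i 0 0 = -1 ∨ pvGoA wind fuel i 0 0 = (i : Int) + 1 := by
  intro fuel i
  cases fuel with
  | zero => left; rfl
  | succ n =>
    simp only [pvGoA]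
    cases PySem.List.pyGet? wind (i : Int) with
    | none => left; rfl
    | some w =>
      right
      simp

theorem pvAlt_self (t sx sy ex ey : Int) (wind : List String)
    (hx : ex - sx = 0) (hy : ey - sy = 0) :
    earliest_time_to_reach_target_alt t sx sy ex ey wind = 0 := by
  unfold earliest_time_to_reach_target_alt pvFirstTime
  simp [hx, hy]

-- ===== VERDICT (by name: the statement is the Claim_ definition above) =====
theorem earliest_time_to_reach_target_spec : Claim_unchanged_earliest_time_to_reach_target := by
  intro t sx sy ex ey wind _ hpre hD
  unfold Pre_earliest_time_to_reach_target at hpre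
  have hne : ¬ (ex - sx = 0 ∧ ey - sy = 0) := by
    intro hc
    exact hD ⟨by omega, by omega⟩
  have hlen : (0 : Nat) + t.toNat ≤ wind.length := by omega
  have htake : PySem.List.slice wind none (some (max t 0)) = wind.take t.toNat := by
    have h0 : (0 : Int) ≤ max t 0 := le_max_right _ _
    have : max t 0 = ((max t 0).toNat : Int) := by omega
    rw [this, PySem.List.slice_to_natCast]
    congr 1
    omega
  unfold earliest_time_to_reach_target earliest_time_to_reach_target_alt
  rw [pvGoA_eq_simA wind t.toNat 0 _ _ hlen]
  simp only [List.drop_zero]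
  rw [pvSimA_eq_comb _ _ _ _ hne]
  have hEx : (if ex > sx then "E" else "W") = (if ex - sx > 0 then "E" else "W") := by
    by_cases h : ex > sx
    · rw [if_pos h, if_pos (by omega)]
    · rw [if_neg h, if_neg (by omega)]
  have hEy : (if ey > sy then "N" else "S") = (if ey - sy > 0 then "N" else "S") := by
    by_cases h : ey > sy
    · rw [if_pos h, if_pos (by omega)]
    · rw [if_neg h, if_neg (by omega)]
  rw [htake, hEx, hEy, pvFirstTime_eq_pvAx, pvFirstTime_eq_pvAx]
  unfold pvComb
  cases pvAx "E" "W" (wind.take t.toNat) (ex - sx) <;>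
    cases pvAx "N" "S" (wind.take t.toNat) (ey - sy) <;> simp

theorem earliest_time_to_reach_target_changed : Claim_changed_earliest_time_to_reach_target := by
  unfold Claim_changed_earliest_time_to_reach_target; decide

theorem earliest_time_to_reach_target_tight : Claim_exact_earliest_time_to_reach_target := by
  intro t sx sy ex ey wind _ _ hD
  obtain ⟨h1, h2⟩ := hD
  rw [pvAlt_self t sx sy ex ey wind (by omega) (by omega)]
  unfold earliest_time_to_reach_target
  rw [(by omega : ex - sx = 0), (by omega : ey - sy = 0)]
  rcases pvGoA_self wind t.toNat 0 with h | h <;> rw [h] <;> omega
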